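-- pv_equiv track=rewrite | github.com/sumezulike/AdventOfCode | 2020/day_14.py | work_numbers
-- ===== SOURCE A (Python) =====
-- def work_numbers(nums):
--     data = {}
--     for mask, numbers in nums:
--         ones_mask = "".join("1" if c == "1" else "0" for c in mask)
--         zeroes_mask = "".join("0" if c == "0" else "1" for c in mask)
--         for index, num in numbers:
--             res = (int(num) | int(ones_mask, 2) )& int(zeroes_mask, 2)
--             data[int(index)] = res
--     return data
-- ===== SOURCE B (Python) =====
-- def work_numbers(nums):
--     data = {}
--     for mask, numbers in nums:
--         for index, num in numbers:
--             n = int(num)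
--             res = 0
--             w = 1
--             for c in reversed(mask):
--                 if c == '1':
--                     res += w
--                 elif c != '0':
--                     res += n % 2 * w
--                 n //= 2
--                 w *= 2
--             data[int(index)] = res
--     return data
-- ===== Notes on version B (the rewrite author's own statement) =====
-- stated objective: alternative
-- what changed: Instead of building two binary-string masks per mask and computing (num | ones_mask) & zeroes_mask with big-integer OR/AND, B walks the reversed mask once per number and accumulates the result bit by bit (mask char '1' adds the weight, '0' adds nothing, anything else adds the number's current low bit), halving the number and doubling the weight as it goes.
import Mathlib
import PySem

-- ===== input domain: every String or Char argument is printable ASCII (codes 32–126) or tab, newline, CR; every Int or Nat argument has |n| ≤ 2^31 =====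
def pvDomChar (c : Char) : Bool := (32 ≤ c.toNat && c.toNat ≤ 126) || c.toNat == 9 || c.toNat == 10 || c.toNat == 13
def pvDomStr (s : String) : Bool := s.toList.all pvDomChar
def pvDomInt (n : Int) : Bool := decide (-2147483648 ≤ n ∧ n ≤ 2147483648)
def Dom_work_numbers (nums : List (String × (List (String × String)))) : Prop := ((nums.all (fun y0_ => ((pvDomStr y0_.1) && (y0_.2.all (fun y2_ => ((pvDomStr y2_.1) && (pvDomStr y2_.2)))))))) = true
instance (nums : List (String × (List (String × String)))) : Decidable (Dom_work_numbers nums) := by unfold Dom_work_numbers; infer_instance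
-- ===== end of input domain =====

-- B replaces A's two precomputed integer masks (OR then AND per number) by a per-number
-- walk over the reversed mask accumulating the result bit by bit with % 2 and // 2
-- (objective: alternative — a genuinely different algorithm of similar cost).


-- ===== PORT A =====
-- int(s, 2) specialised to the strings A feeds it: ones_mask/zeroes_mask are always pure
-- '0'/'1' strings (every mask char is mapped first), so int(s, 2) is exactly the base-2
-- digit fold, and ValueError (= none) happens exactly on the empty string.  Hand-ported
-- in this specialised form; exact on all inputs this port ever passes to it.
def pvBinVal? (cs : List Char) : Option Int :=
  match cs with
  | [] => none
  | _ :: _ => some (cs.foldl (fun a c => 2 * a + (if c = '1' then 1 else 0)) 0)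

def work_numbers (nums : List (String × (List (String × String)))) : List (Int × Int) :=
  (nums.foldl (fun (data : PySem.Dict Int Int) mn =>
      let ones := mn.1.toList.map (fun c => if c = '1' then '1' else '0')
      let zeroes := mn.1.toList.map (fun c => if c = '0' then '0' else '1')
      mn.2.foldl (fun data inum =>
        let res := PySem.Int.band
          (PySem.Int.bor ((PySem.Int.ofStr? inum.2).getD 0) ((pvBinVal? ones).getD 0))
          ((pvBinVal? zeroes).getD 0)
        data.insert ((PySem.Int.ofStr? inum.1).getD 0) res) data)
    PySem.Dict.empty).items

-- ===== PORT B =====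
-- inner loop of Source B: res, w, n accumulator over reversed(mask)
def pvOverlay (mask : List Char) (n0 : Int) : Int :=
  (mask.reverse.foldl (fun (st : Int × Int × Int) c =>
      (if c = '1' then st.1 + st.2.1
       else if c ≠ '0' then st.1 + PySem.Int.mod st.2.2 2 * st.2.1
       else st.1,
       st.2.1 * 2, PySem.Int.floordiv st.2.2 2)) (0, 1, n0)).1

def work_numbers_alt (nums : List (String × (List (String × String)))) : List (Int × Int) :=
  (nums.foldl (fun (data : PySem.Dict Int Int) mn =>
      mn.2.foldl (fun data inum =>
        data.insert ((PySem.Int.ofStr? inum.1).getD 0)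
          (pvOverlay mn.1.toList ((PySem.Int.ofStr? inum.2).getD 0))) data)
    PySem.Dict.empty).items

-- ===== PRECONDITION & SPEC =====
-- Pre_ excludes exactly the inputs where Python A raises ValueError: an empty mask whose
-- numbers list is nonempty (int("", 2)), or an index/num string int() rejects.
def Pre_work_numbers (nums : List (String × (List (String × String)))) : Prop :=
  ∀ mn ∈ nums, ∀ q ∈ mn.2,
    mn.1.toList ≠ [] ∧ (PySem.Int.ofStr? q.1).isSome = true ∧ (PySem.Int.ofStr? q.2).isSome = true
instance (nums : List (String × (List (String × String)))) : Decidable (Pre_work_numbers nums) := by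
  unfold Pre_work_numbers; infer_instance

def pvWitness_work_numbers : (List (String × (List (String × String)))) :=
  [("X01", [("2", "5")])]

def Spec_work_numbers (nums : List (String × (List (String × String)))) (out : List (Int × Int)) : Prop := out = work_numbers_alt nums
instance (nums : List (String × (List (String × String)))) (out : List (Int × Int)) : Decidable (Spec_work_numbers nums out) := by unfold Spec_work_numbers; infer_instance

-- ===== CLAIM (what is proved, stated in full; the proofs are below) =====
def Claim_equal_work_numbers : Prop := ∀ (nums : List (String × (List (String × String)))), Dom_work_numbers nums → Pre_work_numbers nums → Spec_work_numbers nums (work_numbers nums)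

-- ===== LEMMAS AND PROOFS =====

-- m &&& n and m \\ n partition the bits of m
theorem pv_and_add_ldiff (m : Nat) : ∀ n : Nat, (m &&& n) + Nat.ldiff m n = m := by
  induction m using Nat.binaryRec with
  | zero => intro n; simp [Nat.zero_and, Nat.ldiff]
  | bit b m ih =>
    intro n
    cases n using Nat.bitCasesOn with
    | bit c n =>
      have h1 : Nat.bit b m &&& Nat.bit c n = Nat.bit (b && c) (m &&& n) := Nat.land_bit b m c n
      have h2 : (Nat.bit b m).ldiff (Nat.bit c n) = Nat.bit (b && !c) (m.ldiff n) := Nat.ldiff_bit b m c n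
      have := ih n
      rw [h1, h2, Nat.bit_val, Nat.bit_val, Nat.bit_val]
      cases b <;> cases c <;> simp at * <;> omega

theorem pv_key (m n : Nat) : m - (m &&& n) = Nat.ldiff m n := by
  have h := pv_and_add_ldiff m n; omega

-- PySem's Python-exact band/bor agree with Mathlib's Int.land/Int.lor
theorem pv_band_eq_land (a b : Int) : PySem.Int.band a b = Int.land a b := by
  have h : ∀ k : Nat, ¬((k:Int) ≤ -1) := by intro k; omega
  rcases a with m | m <;> rcases b with n | n <;>
    simp [PySem.Int.band, Int.land, Int.negSucc_eq, pv_key, h] <;> omega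

theorem pv_bor_eq_lor (a b : Int) : PySem.Int.bor a b = Int.lor a b := by
  have h : ∀ k : Nat, ¬((k:Int) ≤ -1) := by intro k; omega
  rcases a with m | m <;> rcases b with n | n <;>
    simp [PySem.Int.bor, Int.lor, Int.negSucc_eq, pv_key, h] <;> omega

theorem pv_land_zero (x : Int) : Int.land x 0 = 0 := by
  rcases x with m | m <;> simp [Int.land, Nat.ldiff]

-- the two mask digit maps A builds, as digit values
def pvOneD (c : Char) : Int := if c = '1' then 1 else 0
def pvZeroD (c : Char) : Int := if c = '0' then 0 else 1

-- values of low-bit-first char lists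
def pvWO : List Char → Int
  | [] => 0
  | c :: l => Int.bit (decide (c = '1')) (pvWO l)
def pvWZ : List Char → Int
  | [] => 0
  | c :: l => Int.bit (decide (c ≠ '0')) (pvWZ l)
-- the per-bit overlay value B accumulates, low bit first
def pvG : List Char → Int → Int
  | [], _ => 0
  | c :: l, n => Int.bit (if c = '1' then true else if c = '0' then false else Int.bodd n) (pvG l (Int.div2 n))

-- the heart: OR-ing the ones mask then AND-ing the zeroes mask is the per-bit overlay
theorem pv_bit_main (l : List Char) : ∀ n : Int, Int.land (Int.lor n (pvWO l)) (pvWZ l) = pvG l n := by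
  induction l with
  | nil => intro n; simp [pvWO, pvWZ, pvG, pv_land_zero]
  | cons c l ih =>
    intro n
    show Int.land (Int.lor n (Int.bit (decide (c = '1')) (pvWO l))) (Int.bit (decide (c ≠ '0')) (pvWZ l)) = _
    conv_lhs => rw [← Int.bit_decomp n]
    rw [Int.lor_bit, Int.land_bit, ih (Int.div2 n)]
    show Int.bit _ (pvG l (Int.div2 n)) = Int.bit _ (pvG l (Int.div2 n))
    congr 1
    by_cases h1 : c = '1' <;> by_cases h0 : c = '0' <;> simp [h1, h0] at *

-- value of a high-bit-first digit fold (as in int(s, 2)) via a generic digit function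
def pvV (d : Char → Int) : List Char → Int
  | [] => 0
  | c :: l => d c * 2 ^ l.length + pvV d l

theorem pv_foldl_bin (d : Char → Int) (cs : List Char) : ∀ A : Int,
    cs.foldl (fun a c => 2 * a + d c) A = A * 2 ^ cs.length + pvV d cs := by
  induction cs with
  | nil => intro A; simp [pvV]
  | cons c l ih =>
    intro A
    simp only [List.foldl_cons, ih, pvV, List.length_cons]
    ring

theorem pv_WO_rev (cs : List Char) : pvV pvOneD cs = pvWO cs.reverse := by
  have snoc : ∀ (l : List Char) c, pvWO (l ++ [c]) = pvOneD c * 2 ^ l.length + pvWO l := by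
    intro l
    induction l with
    | nil => intro c; by_cases h : c = '1' <;> simp [pvWO, pvOneD, Int.bit_val, h]
    | cons x l ih =>
      intro c
      simp only [List.cons_append, pvWO, ih, Int.bit_val, List.length_cons]
      ring
  induction cs with
  | nil => rfl
  | cons c l ih => simp [pvV, ih, List.reverse_cons, snoc]

theorem pv_WZ_rev (cs : List Char) : pvV pvZeroD cs = pvWZ cs.reverse := by
  have snoc : ∀ (l : List Char) c, pvWZ (l ++ [c]) = pvZeroD c * 2 ^ l.length + pvWZ l := by
    intro l
    induction l with
    | nil => intro c; by_cases h : c = '0' <;> simp [pvWZ, pvZeroD, Int.bit_val, h]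
    | cons x l ih =>
      intro c
      simp only [List.cons_append, pvWZ, ih, Int.bit_val, List.length_cons]
      ring
  induction cs with
  | nil => rfl
  | cons c l ih => simp [pvV, ih, List.reverse_cons, snoc]

theorem pv_mod_two_bodd (n : Int) : PySem.Int.mod n 2 = if Int.bodd n then 1 else 0 := by
  rw [PySem.Int.mod_eq_emod_of_pos (by omega)]
  rcases n with m | m
  · have hm := Nat.mod_two_of_bodd m
    rw [show Int.bodd (Int.ofNat m) = Nat.bodd m from rfl, Int.ofNat_eq_natCast]
    cases h : Nat.bodd m <;> simp [h] at hm ⊢ <;> omega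
  · have hm := Nat.mod_two_of_bodd m
    rw [show Int.bodd (Int.negSucc m) = !Nat.bodd m from rfl, Int.negSucc_eq]
    cases h : Nat.bodd m <;> simp [h] at hm ⊢ <;> omega

theorem pv_fdiv_two (n : Int) : PySem.Int.floordiv n 2 = Int.div2 n := by
  rw [PySem.Int.floordiv_eq_ediv_of_pos (by omega), Int.div2_val]

-- B's accumulator loop computes pvG of the reversed mask
theorem pv_overlay_loop (l : List Char) : ∀ (res w n : Int),
    (l.foldl (fun (st : Int × Int × Int) c =>
      (if c = '1' then st.1 + st.2.1
       else if c ≠ '0' then st.1 + PySem.Int.mod st.2.2 2 * st.2.1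
       else st.1,
       st.2.1 * 2, PySem.Int.floordiv st.2.2 2)) (res, w, n)).1 = res + w * pvG l n := by
  induction l with
  | nil => intro res w n; simp [pvG]
  | cons c l ih =>
    intro res w n
    rw [List.foldl_cons]
    show (List.foldl _ (_, w * 2, PySem.Int.floordiv n 2) l).1 = _
    rw [ih]
    simp only [pvG, Int.bit_val, pv_fdiv_two, pv_mod_two_bodd]
    by_cases h1 : c = '1' <;> by_cases h0 : c = '0' <;> cases hb : Int.bodd n <;>
      simp [h1, h0] <;> ring

-- the per-mask, per-number equality of A's and B's stored values
theorem pv_inner (mask : List Char) (n : Int) :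
    PySem.Int.band
      (PySem.Int.bor n ((pvBinVal? (mask.map (fun c => if c = '1' then '1' else '0'))).getD 0))
      ((pvBinVal? (mask.map (fun c => if c = '0' then '0' else '1'))).getD 0)
    = pvOverlay mask n := by
  cases mask with
  | nil => simp [pvBinVal?, pvOverlay, PySem.Int.bor_zero, PySem.Int.band_zero]
  | cons c0 l0 =>
    have hones : (pvBinVal? ((c0 :: l0).map (fun c => if c = '1' then '1' else '0'))).getD 0
        = pvWO ((c0 :: l0).reverse) := by
      rw [show (c0 :: l0).map (fun c => if c = '1' then '1' else '0')
            = (if c0 = '1' then '1' else '0') :: l0.map (fun c => if c = '1' then '1' else '0') from rfl]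
      rw [show pvBinVal? ((if c0 = '1' then '1' else '0') :: l0.map (fun c => if c = '1' then '1' else '0'))
            = some (((c0 :: l0).map (fun c => if c = '1' then '1' else '0')).foldl
                (fun a c => 2 * a + (if c = '1' then 1 else 0)) 0) from rfl]
      rw [Option.getD_some, List.foldl_map]
      have hfun : (fun (a : Int) c => 2 * a + (if (if c = '1' then '1' else '0') = '1' then (1:Int) else 0))
          = fun a c => 2 * a + pvOneD c := by
        funext a c; by_cases h : c = '1' <;> simp [h, pvOneD]
      rw [hfun, pv_foldl_bin, pv_WO_rev]; ring_nf
    have hzeroes : (pvBinVal? ((c0 :: l0).map (fun c => if c = '0' then '0' else '1'))).getD 0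
        = pvWZ ((c0 :: l0).reverse) := by
      rw [show (c0 :: l0).map (fun c => if c = '0' then '0' else '1')
            = (if c0 = '0' then '0' else '1') :: l0.map (fun c => if c = '0' then '0' else '1') from rfl]
      rw [show pvBinVal? ((if c0 = '0' then '0' else '1') :: l0.map (fun c => if c = '0' then '0' else '1'))
            = some (((c0 :: l0).map (fun c => if c = '0' then '0' else '1')).foldl
                (fun a c => 2 * a + (if c = '1' then 1 else 0)) 0) from rfl]
      rw [Option.getD_some, List.foldl_map]
      have hfun : (fun (a : Int) c => 2 * a + (if (if c = '0' then '0' else '1') = '1' then (1:Int) else 0))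
          = fun a c => 2 * a + pvZeroD c := by
        funext a c; by_cases h : c = '0' <;> simp [h, pvZeroD]
      rw [hfun, pv_foldl_bin, pv_WZ_rev]; ring_nf
    rw [hones, hzeroes, pv_band_eq_land, pv_bor_eq_lor, pv_bit_main]
    show _ = (List.foldl _ (0, 1, n) ((c0 :: l0).reverse)).1
    rw [pv_overlay_loop]
    ring

-- ===== VERDICT (by name: the statement is the Claim_ definition above) =====
theorem work_numbers_spec : Claim_equal_work_numbers := by
  intro nums _ _
  show work_numbers nums = work_numbers_alt nums
  unfold work_numbers work_numbers_alt
  congr 1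
  congr 1
  funext data mn
  dsimp only
  congr 1
  funext d q
  dsimp only
  rw [pv_inner]
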